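-- pv_equiv track=rewrite | github.com/marianaelsner/CEssayRedditCorpus | 2.ProcessingSteps/PostProcessing_RESULTS/collocates_adj_logdice.py | find_collocates_in_window
-- ===== SOURCE A (Python) =====
-- from collections import Counter
--
-- def find_collocates_in_window(tuples, target_word, window_size=5):
--     collocate_counter = Counter()
--     for i in range(len(tuples)):
--         word, pos = tuples[i]
--         # Check if the word is 'woke' and if it's an adjective (ADJ)
--         if word == target_word and pos == 'ADJ':
--             # Look for words before and after 'woke' in the specified window size
--             start = max(0, i - window_size)
--             end = min(len(tuples), i + window_size + 1)
--             for j in range(start, end):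
--                 # Skip if it's the target word itself or if the collocate is 'woke'
--                 if j != i and tuples[j][0] != target_word:
--                     collocate_counter[tuples[j][0]] += 1
--     return collocate_counter
-- ===== SOURCE B (Python) =====
-- from collections import Counter
--
-- def find_collocates_in_window(tuples, target_word, window_size=5):
--     # index the target-ADJ positions once (prefix sums), then one pass over all positions
--     n = len(tuples)
--     prefix = [0]
--     for t in tuples:
--         prefix.append(prefix[-1] + (1 if t == (target_word, 'ADJ') else 0))
--     collocate_counter = Counter()
--     for j in range(n):
--         word = tuples[j][0]
--         if word != target_word:
--             lo = max(0, j - window_size)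
--             hi = min(n, j + window_size + 1)
--             c = prefix[hi] - prefix[lo] if lo < hi else 0
--             if c > 0:
--                 collocate_counter[word] += c
--     return collocate_counter
-- ===== Notes on version B (the rewrite author's own statement) =====
-- stated objective: alternative
-- what changed: Instead of scanning the window of every matching target position (nested loops), B builds a prefix-sum index of target-ADJ positions once and makes a single pass over all positions, charging each non-target word the number of nearby matches computed in O(1) from the prefix sums.
import Mathlib
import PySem

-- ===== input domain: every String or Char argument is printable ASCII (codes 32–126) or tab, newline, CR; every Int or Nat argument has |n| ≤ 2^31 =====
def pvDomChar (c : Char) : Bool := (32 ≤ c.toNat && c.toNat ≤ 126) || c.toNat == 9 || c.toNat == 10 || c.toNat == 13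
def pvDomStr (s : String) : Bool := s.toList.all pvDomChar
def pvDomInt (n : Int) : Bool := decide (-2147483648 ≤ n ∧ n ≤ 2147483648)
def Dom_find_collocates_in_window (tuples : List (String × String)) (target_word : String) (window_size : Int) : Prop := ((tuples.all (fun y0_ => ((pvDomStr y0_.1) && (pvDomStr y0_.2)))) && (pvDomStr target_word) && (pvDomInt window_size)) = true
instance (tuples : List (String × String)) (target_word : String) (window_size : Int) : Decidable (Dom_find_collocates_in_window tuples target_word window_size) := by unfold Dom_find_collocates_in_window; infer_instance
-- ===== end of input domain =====

-- B replaces A's per-match window scans by a one-pass prefix-sum index of target-ADJ positions (alternative single-pass algorithm).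


-- ===== PORT A =====
def find_collocates_in_window (tuples : List (String × String)) (target_word : String) (window_size : Int) : List (String × Int) :=
  -- collocate_counter = Counter(); for i in range(len(tuples)): ...
  (((PySem.List.pyRange 0 (tuples.length : Int) 1).foldl (fun d i =>
      let wp := PySem.List.pyGetD tuples i ("", "")
      if wp.1 = target_word ∧ wp.2 = "ADJ" then
        let start := max 0 (i - window_size)
        let stop := min (tuples.length : Int) (i + window_size + 1)
        (PySem.List.pyRange start stop 1).foldl (fun d j =>
          if j ≠ i ∧ (PySem.List.pyGetD tuples j ("", "")).1 ≠ target_word then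
            d.modify (PySem.List.pyGetD tuples j ("", "")).1 0 (· + 1)
          else d) d
      else d) PySem.Dict.empty) : PySem.Dict String Int).items

-- ===== PORT B =====
def find_collocates_in_window_alt (tuples : List (String × String)) (target_word : String) (window_size : Int) : List (String × Int) :=
  -- prefix = [0]; for t in tuples: prefix.append(prefix[-1] + (1 if t == (target_word,'ADJ') else 0))
  let pre : List Int := tuples.foldl
    (fun p t => p ++ [PySem.List.pyGetD p (-1) 0 + (if t = (target_word, "ADJ") then 1 else 0)]) [0]
  (((PySem.List.pyRange 0 (tuples.length : Int) 1).foldl (fun d j =>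
      let word := (PySem.List.pyGetD tuples j ("", "")).1
      if word ≠ target_word then
        let lo := max 0 (j - window_size)
        let hi := min (tuples.length : Int) (j + window_size + 1)
        let c := if lo < hi then PySem.List.pyGetD pre hi 0 - PySem.List.pyGetD pre lo 0 else 0
        if c > 0 then d.modify word 0 (· + c) else d
      else d) PySem.Dict.empty) : PySem.Dict String Int).items

-- ===== PRECONDITION & SPEC =====
def Spec_find_collocates_in_window (tuples : List (String × String)) (target_word : String) (window_size : Int) (out : List (String × Int)) : Prop := out = find_collocates_in_window_alt tuples target_word window_size
instance (tuples : List (String × String)) (target_word : String) (window_size : Int) (out : List (String × Int)) : Decidable (Spec_find_collocates_in_window tuples target_word window_size out) := by unfold Spec_find_collocates_in_window; infer_instance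

-- ===== CLAIM (what is proved, stated in full; the proofs are below) =====
def Claim_equal_find_collocates_in_window : Prop := ∀ (tuples : List (String × String)) (target_word : String) (window_size : Int), Dom_find_collocates_in_window tuples target_word window_size → Spec_find_collocates_in_window tuples target_word window_size (find_collocates_in_window tuples target_word window_size)

-- ===== LEMMAS AND PROOFS =====

-- proof-side abbreviations for the shared combinatorics
def pvWord (ts : List (String × String)) (j : Nat) : String := (ts.getD j ("", "")).1

def pvIsM (ts : List (String × String)) (tw : String) (i : Nat) : Bool := ts.getD i ("", "") == (tw, "ADJ")

def pvM (ts : List (String × String)) (tw : String) : List Nat := (List.range ts.length).filter (pvIsM ts tw)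

def pvP (ts : List (String × String)) (tw : String) (j : Nat) : Bool := pvWord ts j != tw

def pvWin (ts : List (String × String)) (w : Int) (i j : Nat) : Bool :=
  decide (max 0 ((i : Int) - w) ≤ (j : Int) ∧ (j : Int) < min (ts.length : Int) ((i : Int) + w + 1))

def pvWinL (ts : List (String × String)) (tw : String) (w : Int) (i : Nat) : List Nat :=
  (List.range ts.length).filter (fun j => pvP ts tw j && pvWin ts w i j)

def pvJA (ts : List (String × String)) (tw : String) (w : Int) : List Nat :=
  (pvM ts tw).flatMap (pvWinL ts tw w)

def pvCnt (ts : List (String × String)) (tw : String) (w : Int) (j : Nat) : Nat :=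
  (pvM ts tw).countP (fun i => pvWin ts w i j)

def pvJB (ts : List (String × String)) (tw : String) (w : Int) : List Nat :=
  (List.range ts.length).filter (fun j => pvP ts tw j && (pvM ts tw).any (fun i => pvWin ts w i j))

-- generic list facts -------------------------------------------------------

theorem pv_sorted_mem_ext {α : Type} [LinearOrder α] (l1 l2 : List α)
    (h1 : l1.Pairwise (· < ·)) (h2 : l2.Pairwise (· < ·)) (hm : ∀ x, x ∈ l1 ↔ x ∈ l2) : l1 = l2 :=
  List.Perm.eq_of_pairwise (fun _ _ _ _ hab hba => le_antisymm hab hba)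
    (h1.imp le_of_lt) (h2.imp le_of_lt) ((List.perm_ext_iff_of_nodup h1.nodup h2.nodup).mpr hm)

theorem pv_pyRange_pairwise (a b : Int) : (PySem.List.pyRange a b).Pairwise (· < ·) := by
  by_cases h : a < b
  · rw [PySem.List.pyRange_one_cons h]
    exact List.Pairwise.cons
      (fun x hx => by have := PySem.List.mem_pyRange_one.mp hx; omega)
      (pv_pyRange_pairwise (a + 1) b)
  · have hnil : PySem.List.pyRange a b = [] := by
      refine List.eq_nil_iff_forall_not_mem.mpr (fun x hx => ?_)
      have := PySem.List.mem_pyRange_one.mp hx; omega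
    rw [hnil]; exact List.Pairwise.nil
termination_by (b - a).toNat
decreasing_by omega

theorem pv_sum_filter_ite {α : Type} (l : List α) (p : α → Bool) (g : α → Nat) :
    ((l.filter p).map g).sum = (l.map (fun x => if p x then g x else 0)).sum := by
  induction l with
  | nil => rfl
  | cons x l ih => cases h : p x <;> simp [h, ih]

theorem pv_countP_sum_swap {α β : Type} (A : List α) (B : List β) (Q : α → β → Bool) :
    (A.map (fun a => B.countP (Q a))).sum = (B.map (fun b => A.countP (fun a => Q a b))).sum := by
  induction A with
  | nil => simp
  | cons a A ih =>
    have hpt : (B.map (fun b => (a :: A).countP (fun a' => Q a' b))).sum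
        = (B.map (fun b => A.countP (fun a' => Q a' b) + (if Q a b then 1 else 0))).sum := by
      refine congrArg List.sum (List.map_congr_left (fun b _ => ?_))
      rw [List.countP_cons]
    rw [List.map_cons, List.sum_cons, ih, hpt, List.sum_map_add,
      PySem.List.sum_map_ite_one_zero_nat]
    omega

-- Set facts ----------------------------------------------------------------

theorem pv_contains_eq {α : Type} [BEq α] [LawfulBEq α] (s : PySem.Set α) (x : α) :
    PySem.Set.contains s x = decide (x ∈ s) := by
  by_cases h : x ∈ s
  · simp [h]
  · simp only [h, decide_false]
    exact Bool.eq_false_iff.mpr (fun hc => h ((PySem.Set.contains_iff s x).mp hc))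

theorem pv_foldl_add_seen {α : Type} [BEq α] [LawfulBEq α] (l : List α) (s : PySem.Set α) (x : α)
    (hx : x ∈ s) : List.foldl PySem.Set.add s l = List.foldl PySem.Set.add s (l.filter (fun y => !(y == x))) := by
  induction l generalizing s with
  | nil => rfl
  | cons y l ih =>
    rw [List.filter_cons]
    by_cases hy : y = x
    · subst hy
      have hadd : PySem.Set.add s y = s := by simp [PySem.Set.add, hx]
      rw [if_neg (by simp), List.foldl_cons, hadd]
      exact ih s hx
    · have hb : (!(y == x)) = true := by simp [hy]
      rw [hb, if_pos rfl, List.foldl_cons, List.foldl_cons]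
      have hx' : x ∈ PySem.Set.add s y := by
        by_cases hc : y ∈ s <;> simp [PySem.Set.add, hc, hx]
      exact ih _ hx' 

theorem pv_foldl_add_cons_front {α : Type} [BEq α] [LawfulBEq α] (l : List α) (s : PySem.Set α) (x : α)
    (hl : x ∉ l) : List.foldl PySem.Set.add (x :: s) l = x :: List.foldl PySem.Set.add s l := by
  induction l generalizing s with
  | nil => rfl
  | cons y l ih =>
    have hyx : ¬(y = x) := fun h => hl (h ▸ List.mem_cons_self)
    have hstep : PySem.Set.add (x :: s) y = x :: PySem.Set.add s y := by
      by_cases hc : y ∈ s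
      · simp [PySem.Set.add, hc, hyx]
      · simp [PySem.Set.add, hc, hyx]
    rw [List.foldl_cons, List.foldl_cons, hstep, ih _ (fun h => hl (List.mem_cons_of_mem _ h))]

theorem pv_ofList_cons {α : Type} [BEq α] [LawfulBEq α] (x : α) (l : List α) :
    PySem.Set.ofList (x :: l) = x :: PySem.Set.ofList (l.filter (fun y => !(y == x))) := by
  rw [PySem.Set.ofList_eq_foldl, PySem.Set.ofList_eq_foldl, List.foldl_cons]
  have h0 : PySem.Set.add [] x = [x] := by simp [PySem.Set.add]
  rw [h0, pv_foldl_add_seen l [x] x (by simp)]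
  exact pv_foldl_add_cons_front _ [] x (by simp)

theorem pv_foldl_add_filter {α : Type} [BEq α] [LawfulBEq α] (l : List α) (s : PySem.Set α)
    (p : α → Bool) :
    (List.foldl PySem.Set.add s l).filter p = List.foldl PySem.Set.add (s.filter p) (l.filter p) := by
  induction l generalizing s with
  | nil => rfl
  | cons y l ih =>
    rw [List.foldl_cons, ih, List.filter_cons]
    by_cases hpy : p y = true
    · have : (PySem.Set.add s y).filter p = PySem.Set.add (s.filter p) y := by
        by_cases hc : y ∈ s
        · have : y ∈ s.filter p := List.mem_filter.mpr ⟨hc, hpy⟩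
          simp [PySem.Set.add, hc, this]
        · have : y ∉ s.filter p := fun h => hc (List.mem_filter.mp h).1
          simp [PySem.Set.add, hc, this, List.filter_append, hpy]
      rw [this, hpy, if_pos rfl, List.foldl_cons]
    · have : (PySem.Set.add s y).filter p = s.filter p := by
        by_cases hc : y ∈ s
        · simp [PySem.Set.add, hc]
        · simp [PySem.Set.add, hc, List.filter_append,
            Bool.eq_false_iff.mpr hpy]
      rw [this, Bool.eq_false_iff.mpr hpy, if_neg (by simp)]

theorem pv_filter_ofList {α : Type} [BEq α] [LawfulBEq α] (l : List α) (p : α → Bool) :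
    PySem.Set.ofList (l.filter p) = (PySem.Set.ofList l).filter p := by
  rw [PySem.Set.ofList_eq_foldl, PySem.Set.ofList_eq_foldl]
  exact (pv_foldl_add_filter l [] p).symm

theorem pv_map_ofList {α β : Type} [BEq α] [LawfulBEq α] [BEq β] [LawfulBEq β] (f : α → β) (l : List α) :
    PySem.Set.ofList (l.map f) = PySem.Set.ofList ((PySem.Set.ofList l).map f) := by
  match l with
  | [] => rfl
  | x :: tl =>
    have hq : ∀ (m : List α), (m.filter (fun y => !(y == x))).filter (fun a => !(f a == f x))
        = m.filter (fun a => !(f a == f x)) := by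
      intro m
      rw [List.filter_filter]
      refine List.filter_congr (fun a _ => ?_)
      by_cases hfa : f a = f x
      · simp [hfa]
      · have : ¬(a = x) := fun h => hfa (h ▸ rfl)
        simp [hfa, this]
    have hrec := pv_map_ofList f (tl.filter (fun a => !(f a == f x)))
    calc PySem.Set.ofList ((x :: tl).map f)
        = f x :: PySem.Set.ofList ((tl.map f).filter (fun y => !(y == f x))) := by
          rw [List.map_cons, pv_ofList_cons]
      _ = f x :: PySem.Set.ofList ((tl.filter (fun a => !(f a == f x))).map f) := by
          rw [List.filter_map]; rfl
      _ = f x :: PySem.Set.ofList (((PySem.Set.ofList (tl.filter (fun a => !(f a == f x))))).map f) := by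
          rw [hrec]
      _ = PySem.Set.ofList ((PySem.Set.ofList (x :: tl)).map f) := by
          rw [pv_ofList_cons x tl, List.map_cons, pv_ofList_cons (f x), List.filter_map]
          show _ = _ :: PySem.Set.ofList (((PySem.Set.ofList (tl.filter (fun y => !(y == x)))).filter
            (fun a => !(f a == f x))).map f)
          rw [← pv_filter_ofList, hq]
termination_by l.length
decreasing_by
  simp only [List.length_cons]
  have := List.length_filter_le (fun a => !(f a == f x)) tl
  omega

theorem pv_foldl_add_eq_append {α : Type} [BEq α] [LawfulBEq α] (l : List α) (s : PySem.Set α)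
    (hl : l.Nodup) :
    List.foldl PySem.Set.add s l = s ++ l.filter (fun x => !(PySem.Set.contains s x)) := by
  induction l generalizing s with
  | nil => simp
  | cons y l ih =>
    have hnd := (List.nodup_cons.mp hl)
    rw [List.foldl_cons, ih _ hnd.2, List.filter_cons]
    by_cases hc : y ∈ s
    · have hadd : PySem.Set.add s y = s := by simp [PySem.Set.add, hc]
      simp [hc]
    · have hadd : PySem.Set.add s y = s ++ [y] := by simp [PySem.Set.add, hc]
      have hfc : l.filter (fun x => !(PySem.Set.contains (s ++ [y]) x))
          = l.filter (fun x => !(PySem.Set.contains s x)) := by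
        refine List.filter_congr (fun x hx => ?_)
        have hxy : ¬(x = y) := fun h => hnd.1 (h ▸ hx)
        simp [hxy]
      rw [hadd, hfc]
      have hcy : (!(PySem.Set.contains s y)) = true := by simp [hc]
      rw [hcy]
      simp

-- Dict fold value ----------------------------------------------------------

theorem pv_getD_foldl_modify_key_add {κ β : Type} [BEq κ] [LawfulBEq κ] [DecidableEq κ]
    (l : List β) (key : β → κ) (g : β → Int) (d : PySem.Dict κ Int) (k : κ) :
    (List.foldl (fun d x => d.modify (key x) 0 (· + g x)) d l).getD k 0
      = d.getD k 0 + ((l.filter (fun x => key x == k)).map g).sum := by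
  induction l generalizing d with
  | nil => simp
  | cons x l ih =>
    rw [List.foldl_cons, ih, PySem.Dict.getD_modify, List.filter_cons]
    by_cases hk : k = key x
    · rw [if_pos hk, if_pos (by simp [hk]), List.map_cons, List.sum_cons, hk]
      ring
    · rw [if_neg hk, if_neg (by simpa using (fun h => hk h.symm))]

theorem pv_pyGetD_neg_one {α : Type} (xs : List α) (d : α) (h : xs ≠ []) :
    PySem.List.pyGetD xs (-1) d = xs.getD (xs.length - 1) d := by
  have hl : 0 < xs.length := List.length_pos_iff.mpr h
  simp only [PySem.List.pyGetD, PySem.List.pyGet?, PySem.List.pyIdx?]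
  rw [if_neg (by omega), if_pos (by omega)]
  simp [List.getD_eq_getElem?_getD]

theorem pv_countP_range_sub (p : Nat → Bool) (a b : Nat) (hab : a ≤ b) :
    (List.range b).countP p
      = (List.range a).countP p + (List.range b).countP (fun i => p i && decide (a ≤ i)) := by
  have hsplit : List.range b = List.range a ++ (List.range (b - a)).map (fun x => a + x) := by
    rw [← List.range_add]; congr 1; omega
  rw [hsplit, List.countP_append, List.countP_append, List.countP_map, List.countP_map]
  have h0 : (List.range a).countP (fun i => p i && decide (a ≤ i)) = 0 :=
    List.countP_eq_zero.mpr (fun i hi => by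
      have := List.mem_range.mp hi
      simp [Nat.not_le.mpr this])
  have hcg : (List.range (b - a)).countP ((fun i => p i && decide (a ≤ i)) ∘ (fun x => a + x))
      = (List.range (b - a)).countP (p ∘ (fun x => a + x)) := by
    refine List.countP_congr (fun x _ => ?_)
    simp
  rw [h0, hcg]
  omega

theorem pv_countP_range_ext (p : Nat → Bool) (b n : Nat) (hb : b ≤ n) :
    (List.range b).countP p = (List.range n).countP (fun i => p i && decide (i < b)) := by
  have hsplit : List.range n = List.range b ++ (List.range (n - b)).map (fun x => b + x) := by
    rw [← List.range_add]; congr 1; omega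
  rw [hsplit, List.countP_append, List.countP_map]
  have h0 : (List.range (n - b)).countP ((fun i => p i && decide (i < b)) ∘ (fun x => b + x)) = 0 :=
    List.countP_eq_zero.mpr (fun i _ => by simp)
  have hcg : (List.range b).countP (fun i => p i && decide (i < b))
      = (List.range b).countP p := by
    refine List.countP_congr (fun x hx => ?_)
    have := List.mem_range.mp hx
    simp [this]
  rw [h0, hcg]
  omega

-- port normalisations ------------------------------------------------------

theorem pv_pyRange_win (ts : List (String × String)) (w : Int) (i : Nat) :
    PySem.List.pyRange (max 0 ((i:Int) - w)) (min (ts.length:Int) ((i:Int) + w + 1))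
      = List.map (fun (j : Nat) => (j : Int)) ((List.range ts.length).filter (fun j => pvWin ts w i j)) := by
  refine pv_sorted_mem_ext _ _ (pv_pyRange_pairwise _ _) ?_ ?_
  · exact List.Pairwise.map _ (fun a b h => by exact_mod_cast h) ((List.pairwise_lt_range).filter _)
  · intro x
    rw [PySem.List.mem_pyRange_one]
    simp only [List.mem_map, List.mem_filter, List.mem_range]
    constructor
    · intro hx
      have h0 : 0 ≤ x := le_trans (le_max_left _ _) hx.1
      have h1 : x.toNat < ts.length := by omega
      have h2 : pvWin ts w i x.toNat = true := by
        simp only [pvWin, decide_eq_true_eq]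
        omega
      exact ⟨x.toNat, ⟨h1, h2⟩, Int.toNat_of_nonneg h0⟩
    · rintro ⟨j, ⟨hj, hwin⟩, rfl⟩
      simp only [pvWin, decide_eq_true_eq] at hwin
      omega

theorem pv_A_norm (ts : List (String × String)) (tw : String) (w : Int) :
    find_collocates_in_window ts tw w
      = (PySem.Dict.counter ((pvJA ts tw w).map (pvWord ts))).items := by
  unfold find_collocates_in_window
  rw [PySem.List.pyRange_zero_natCast, List.foldl_map]
  refine congrArg PySem.Dict.items ?_
  conv_rhs => rw [PySem.Dict.counter_eq_foldl, List.foldl_map]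
  simp only [pvJA]
  conv_rhs => rw [List.foldl_flatMap]
  refine Eq.trans (PySem.List.foldl_congr_mem _ _
    (fun (d : PySem.Dict String Int) i => if pvIsM ts tw i then
        List.foldl (fun (d : PySem.Dict String Int) j => d.modify (pvWord ts j) 0 (· + 1)) d (pvWinL ts tw w i)
      else d) _ ?_) ?_
  · intro d i hi
    have hin : i < ts.length := List.mem_range.mp hi
    simp only [PySem.List.pyGetD_natCast]
    by_cases hM : pvIsM ts tw i = true
    · have hpair : ts.getD i ("", "") = (tw, "ADJ") := by simpa [pvIsM] using hM
      rw [if_pos hM, if_pos (by rw [hpair]; exact ⟨rfl, rfl⟩)]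
      rw [pv_pyRange_win, List.foldl_map]
      refine Eq.trans (PySem.List.foldl_congr_mem _ _
        (fun (d : PySem.Dict String Int) j => if pvP ts tw j then d.modify (pvWord ts j) 0 (· + 1) else d) _ ?_) ?_
      · intro d j hj
        simp only [PySem.List.pyGetD_natCast]
        by_cases hP : pvP ts tw j = true
        · have hne : (ts.getD j ("", "")).1 ≠ tw := by simpa [pvP, pvWord] using hP
          have hji : (j : Int) ≠ (i : Int) := by
            intro hcast
            have hji' : j = i := by exact_mod_cast hcast
            exact hne (by rw [hji', hpair])
          rw [if_pos ⟨hji, hne⟩, if_pos hP]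
          rfl
        · have hne : ¬((ts.getD j ("", "")).1 ≠ tw) := by simpa [pvP, pvWord] using hP
          rw [if_neg (fun hc => hne hc.2), if_neg hP]
      · rw [PySem.List.foldl_if_eq_foldl_filter, List.filter_filter]
        rfl
    · have hM' : ¬(ts.getD i ("", "") = (tw, "ADJ")) := by simpa [pvIsM] using hM
      rw [if_neg hM, if_neg (fun hc => hM' (Prod.ext_iff.mpr ⟨hc.1, hc.2⟩))]
  · rw [PySem.List.foldl_if_eq_foldl_filter]
    rfl

theorem pv_pre_eq (ts : List (String × String)) (tw : String) :
    ts.foldl (fun p t => p ++ [PySem.List.pyGetD p (-1) 0 + (if t = (tw, "ADJ") then 1 else 0)]) [0]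
      = (List.range (ts.length + 1)).map (fun k => (((ts.take k).countP (fun t => t == (tw, "ADJ"))) : Int)) := by
  induction ts using List.reverseRecOn with
  | nil => rfl
  | append_singleton ts t ih =>
    rw [List.foldl_append, ih]
    have hlen : (ts ++ [t]).length = ts.length + 1 := by simp
    rw [hlen]
    have h1 : (List.range (ts.length + 1)).map
          (fun k => ((((ts ++ [t]).take k).countP (fun t => t == (tw, "ADJ"))) : Int))
        = (List.range (ts.length + 1)).map
          (fun k => (((ts.take k).countP (fun t => t == (tw, "ADJ"))) : Int)) := by
      refine List.map_congr_left (fun k hk => ?_)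
      have hkle : k ≤ ts.length := Nat.lt_succ_iff.mp (List.mem_range.mp hk)
      rw [List.take_append_of_le_length hkle]
    conv_rhs => rw [List.range_succ, List.map_append, h1]
    simp only [List.foldl_cons, List.foldl_nil]
    congr 1
    have hne : (List.range (ts.length + 1)).map
        (fun k => (((ts.take k).countP (fun t => t == (tw, "ADJ"))) : Int)) ≠ [] := by
      simp
    rw [pv_pyGetD_neg_one _ _ hne]
    have hlast : ((List.range (ts.length + 1)).map
        (fun k => (((ts.take k).countP (fun t => t == (tw, "ADJ"))) : Int))).getD
          (((List.range (ts.length + 1)).map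
            (fun k => (((ts.take k).countP (fun t => t == (tw, "ADJ"))) : Int))).length - 1) 0
        = ((ts.take ts.length).countP (fun t => t == (tw, "ADJ")) : Int) := by
      rw [List.length_map, List.length_range]
      exact PySem.List.getD_map_range _ _ _ _ (by omega)
    rw [hlast, List.take_length, List.map_cons, List.map_nil]
    have htake : (ts ++ [t]).take (ts.length + 1) = ts ++ [t] := by
      rw [← hlen, List.take_length]
    rw [htake, List.countP_append]
    simp only [List.countP_cons, List.countP_nil]
    by_cases ht : t = (tw, "ADJ")
    · rw [if_pos ht, if_pos (by simp [ht])]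
      push_cast
      ring_nf
    · rw [if_neg ht, if_neg (by simpa using ht)]
      push_cast
      ring_nf

theorem pv_take_countP (ts : List (String × String)) (tw : String) (k : Nat) (hk : k ≤ ts.length) :
    (ts.take k).countP (fun t => t == (tw, "ADJ")) = (List.range k).countP (pvIsM ts tw) := by
  have hts : ts.take k = (List.range k).map (fun i => ts.getD i ("", "")) := by
    apply List.ext_getElem
    · simp [hk]
    · intro i h1 h2
      have hik : i < k := by simpa using h2
      have hin : i < ts.length := lt_of_lt_of_le hik hk
      simp [List.getElem_take, List.getD_eq_getElem?_getD, List.getElem?_eq_getElem hin]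
  rw [hts, List.countP_map]
  rfl

theorem pv_cB_eq (ts : List (String × String)) (tw : String) (w : Int) (j : Nat) (hj : j < ts.length) :
    (if max 0 ((j:Int) - w) < min (ts.length : Int) ((j:Int) + w + 1) then
        PySem.List.pyGetD ((List.range (ts.length + 1)).map (fun k => (((List.range k).countP (pvIsM ts tw)) : Int)))
          (min (ts.length : Int) ((j:Int) + w + 1)) 0
        - PySem.List.pyGetD ((List.range (ts.length + 1)).map (fun k => (((List.range k).countP (pvIsM ts tw)) : Int)))
          (max 0 ((j:Int) - w)) 0
      else 0) = (pvCnt ts tw w j : Int) := by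
  have hcntP : pvCnt ts tw w j
      = (List.range ts.length).countP (fun i => pvWin ts w i j && pvIsM ts tw i) := by
    unfold pvCnt pvM
    rw [List.countP_filter]
  by_cases h : max 0 ((j:Int) - w) < min (ts.length : Int) ((j:Int) + w + 1)
  · rw [if_pos h]
    have h0lo : (0:Int) ≤ max 0 ((j:Int) - w) := le_max_left _ _
    have hhin : min (ts.length : Int) ((j:Int) + w + 1) ≤ (ts.length:Int) := min_le_left _ _
    have hlo : max 0 ((j:Int) - w) = (((max 0 ((j:Int) - w)).toNat : Nat) : Int) := by omega
    have hhi : min (ts.length : Int) ((j:Int) + w + 1)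
        = (((min (ts.length : Int) ((j:Int) + w + 1)).toNat : Nat) : Int) := by omega
    set lo' := (max 0 ((j:Int) - w)).toNat with hlo'
    set hi' := (min (ts.length : Int) ((j:Int) + w + 1)).toNat with hhi'
    rw [hlo, hhi, PySem.List.pyGetD_natCast, PySem.List.pyGetD_natCast,
      PySem.List.getD_map_range _ _ _ _ (by omega), PySem.List.getD_map_range _ _ _ _ (by omega)]
    rw [pv_countP_range_sub (pvIsM ts tw) lo' hi' (by omega),
      pv_countP_range_ext (fun i => pvIsM ts tw i && decide (lo' ≤ i)) hi' ts.length (by omega)]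
    have hcg : (List.range ts.length).countP (fun i => (pvIsM ts tw i && decide (lo' ≤ i)) && decide (i < hi'))
        = (List.range ts.length).countP (fun i => pvWin ts w i j && pvIsM ts tw i) := by
      refine List.countP_congr (fun i hi => ?_)
      have hin := List.mem_range.mp hi
      by_cases hM : pvIsM ts tw i = true
      · simp only [hM, Bool.true_and, Bool.and_true, pvWin, Bool.and_eq_true, decide_eq_true_eq]
        omega
      · simp [hM]
    rw [hcg, hcntP]
    push_cast
    ring
  · rw [if_neg h]
    have hz : pvCnt ts tw w j = 0 := by
      rw [hcntP]
      refine List.countP_eq_zero.mpr (fun i hi => ?_)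
      have hin := List.mem_range.mp hi
      simp only [pvWin, Bool.and_eq_true, decide_eq_true_eq, not_and]
      intro hwin _
      omega
    rw [hz]
    rfl

theorem pv_B_norm (ts : List (String × String)) (tw : String) (w : Int) :
    find_collocates_in_window_alt ts tw w
      = ((pvJB ts tw w).foldl
          (fun d j => d.modify (pvWord ts j) 0 (· + (pvCnt ts tw w j : Int))) PySem.Dict.empty).items := by
  unfold find_collocates_in_window_alt
  rw [pv_pre_eq]
  have hpre : (List.range (ts.length + 1)).map (fun k => (((ts.take k).countP (fun t => t == (tw, "ADJ"))) : Int))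
      = (List.range (ts.length + 1)).map (fun k => (((List.range k).countP (pvIsM ts tw)) : Int)) := by
    refine List.map_congr_left (fun k hk => ?_)
    rw [pv_take_countP ts tw k (Nat.lt_succ_iff.mp (List.mem_range.mp hk))]
  rw [hpre, PySem.List.pyRange_zero_natCast]
  simp only [List.foldl_map]
  refine congrArg PySem.Dict.items ?_
  refine Eq.trans (PySem.List.foldl_congr_mem _ _
    (fun (d : PySem.Dict String Int) j =>
      if pvP ts tw j && decide (0 < pvCnt ts tw w j) then
        d.modify (pvWord ts j) 0 (· + (pvCnt ts tw w j : Int))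
      else d) _ ?_) ?_
  · intro d j hj
    have hjn : j < ts.length := List.mem_range.mp hj
    simp only [PySem.List.pyGetD_natCast]
    rw [pv_cB_eq ts tw w j hjn]
    by_cases hP : pvP ts tw j = true
    · have hne : (ts.getD j ("", "")).1 ≠ tw := by simpa [pvP, pvWord] using hP
      rw [if_pos hne]
      by_cases hC : 0 < pvCnt ts tw w j
      · rw [if_pos (by exact_mod_cast hC), if_pos (by rw [hP, decide_eq_true hC]; rfl)]
        rfl
      · rw [if_neg (by exact_mod_cast hC), if_neg (by rw [hP]; simpa using hC)]
    · have hne : ¬((ts.getD j ("", "")).1 ≠ tw) := by simpa [pvP, pvWord] using hP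
      rw [if_neg hne, if_neg (by rw [Bool.eq_false_iff.mpr hP]; simp)]
  · rw [PySem.List.foldl_if_eq_foldl_filter]
    congr 1
    refine List.filter_congr (fun j _ => ?_)
    by_cases hP : pvP ts tw j = true
    · simp only [hP, Bool.true_and]
      cases hA : (pvM ts tw).any (fun i => pvWin ts w i j)
      · have h0 : pvCnt ts tw w j = 0 :=
          List.countP_eq_zero.mpr (fun i hi hwin => (List.any_eq_false.mp hA i hi) hwin)
        simp [h0]
      · obtain ⟨i, hi, hwin⟩ := List.any_eq_true.mp hA
        have h0 : 0 < pvCnt ts tw w j := List.countP_pos_iff.mpr ⟨i, hi, hwin⟩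
        simp [h0]
    · rw [Bool.eq_false_iff.mpr hP]
      simp

-- key-set equality ---------------------------------------------------------

theorem pv_staircase (ts : List (String × String)) (tw : String) (w : Int) (Ms : List Nat)
    (hs : Ms.Pairwise (· < ·)) :
    PySem.Set.ofList (Ms.flatMap (pvWinL ts tw w))
      = (List.range ts.length).filter (fun j => pvP ts tw j && Ms.any (fun i => pvWin ts w i j)) := by
  induction Ms using List.reverseRecOn with
  | nil => simp
  | append_singleton Ms i ih =>
    have hpa := List.pairwise_append.mp hs
    have hlt : ∀ k ∈ Ms, k < i := fun k hk => hpa.2.2 k hk i List.mem_cons_self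
    have hWinNodup : (pvWinL ts tw w i).Nodup := (List.nodup_range).filter _
    have hofl : PySem.Set.ofList ((Ms ++ [i]).flatMap (pvWinL ts tw w))
        = (PySem.Set.ofList (Ms.flatMap (pvWinL ts tw w)))
          ++ (pvWinL ts tw w i).filter
              (fun x => !(PySem.Set.contains (PySem.Set.ofList (Ms.flatMap (pvWinL ts tw w))) x)) := by
      rw [List.flatMap_append, PySem.Set.ofList_eq_foldl, List.foldl_append,
        ← PySem.Set.ofList_eq_foldl]
      have : [i].flatMap (pvWinL ts tw w) = pvWinL ts tw w i := by simp
      rw [this, pv_foldl_add_eq_append _ _ hWinNodup]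
    rw [hofl, ih hpa.1]
    set S := (List.range ts.length).filter (fun j => pvP ts tw j && Ms.any (fun i => pvWin ts w i j)) with hS
    have hmemS : ∀ x, x ∈ S ↔ (x < ts.length ∧ pvP ts tw x = true ∧ ∃ k ∈ Ms, pvWin ts w k x = true) := by
      intro x
      simp [hS, List.mem_filter, List.mem_range, List.any_eq_true]
    have hmemW : ∀ x, x ∈ pvWinL ts tw w i ↔ (x < ts.length ∧ pvP ts tw x = true ∧ pvWin ts w i x = true) := by
      intro x
      simp [pvWinL, List.mem_filter, List.mem_range]
    refine pv_sorted_mem_ext _ _ ?_ ?_ ?_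
    · refine List.pairwise_append.mpr ⟨(List.pairwise_lt_range).filter _, ((List.pairwise_lt_range).filter _).filter _, ?_⟩
      intro y hy x hx
      obtain ⟨hy1, hy2, k, hk, hy3⟩ := (hmemS y).mp hy
      have hxw := (hmemW x).mp (List.mem_of_mem_filter hx)
      have hxnS : x ∉ S := by
        have := (List.mem_filter.mp hx).2
        simp only [pv_contains_eq, Bool.not_eq_eq_eq_not, Bool.not_true, decide_eq_false_iff_not] at this
        exact this
      have hxna : ¬ (pvWin ts w k x = true) := by
        intro hwin
        exact hxnS ((hmemS x).mpr ⟨hxw.1, hxw.2.1, k, hk, hwin⟩)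
      have hki := hlt k hk
      obtain ⟨hx1, hx2, hx3⟩ := hxw
      simp only [pvWin, decide_eq_true_eq, not_and, not_lt] at hy3 hx3 hxna
      omega
    · exact (List.pairwise_lt_range).filter _
    · intro x
      simp only [List.mem_append, List.mem_filter, List.mem_range, List.any_append,
        List.any_cons, List.any_nil, Bool.or_false, Bool.and_eq_true, Bool.or_eq_true]
      constructor
      · rintro (hx | ⟨hx, -⟩)
        · obtain ⟨h1, h2, k, hk, h3⟩ := (hmemS x).mp hx
          exact ⟨h1, h2, Or.inl (List.any_eq_true.mpr ⟨k, hk, h3⟩)⟩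
        · obtain ⟨h1, h2, h3⟩ := (hmemW x).mp hx
          exact ⟨h1, h2, Or.inr h3⟩
      · rintro ⟨h1, h2, h3 | h3⟩
        · obtain ⟨k, hk, hwin⟩ := List.any_eq_true.mp h3
          exact Or.inl ((hmemS x).mpr ⟨h1, h2, k, hk, hwin⟩)
        · by_cases hxS : x ∈ S
          · exact Or.inl hxS
          · refine Or.inr ⟨(hmemW x).mpr ⟨h1, h2, h3⟩, ?_⟩
            simp [hxS]

theorem pv_dedup_JA (ts : List (String × String)) (tw : String) (w : Int) :
    PySem.Set.ofList (pvJA ts tw w) = pvJB ts tw w := by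
  exact pv_staircase ts tw w (pvM ts tw) ((List.pairwise_lt_range).filter _)

-- value equality -----------------------------------------------------------

theorem pv_count_eq (ts : List (String × String)) (tw : String) (w : Int) (k : String) :
    ((((pvJA ts tw w).map (pvWord ts)).count k : Nat) : Int)
      = (((pvJB ts tw w).filter (fun j => pvWord ts j == k)).map (fun j => (pvCnt ts tw w j : Int))).sum := by
  have hcnt0 : ∀ j, (pvM ts tw).any (fun i => pvWin ts w i j) = false → pvCnt ts tw w j = 0 := by
    intro j hany
    exact List.countP_eq_zero.mpr (fun i hi hwin => (List.any_eq_false.mp hany i hi) hwin)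
  have hA : (((pvJA ts tw w).map (pvWord ts)).count k)
      = ((List.range ts.length).map
          (fun j => if (pvWord ts j == k) && pvP ts tw j then pvCnt ts tw w j else 0)).sum := by
    rw [List.count_eq_countP, List.countP_map]
    show ((pvM ts tw).flatMap (pvWinL ts tw w)).countP (fun j => pvWord ts j == k) = _
    rw [List.flatMap_def, List.countP_flatten, List.map_map]
    have h1 : ((pvM ts tw).map (List.countP (fun j => pvWord ts j == k) ∘ pvWinL ts tw w))
        = (pvM ts tw).map (fun i => (List.range ts.length).countP
            (fun j => (pvWord ts j == k) && (pvP ts tw j && pvWin ts w i j))) := by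
      refine List.map_congr_left (fun i _ => ?_)
      show (List.countP _ ((List.range ts.length).filter _)) = _
      rw [List.countP_filter]
    rw [h1, pv_countP_sum_swap]
    refine congrArg List.sum (List.map_congr_left (fun j _ => ?_))
    by_cases h2 : (pvWord ts j == k) = true
    · by_cases h3 : pvP ts tw j = true
      · rw [if_pos (by rw [h2, h3]; rfl)]
        unfold pvCnt
        refine List.countP_congr (fun i _ => ?_)
        rw [h2, h3]
        simp
      · rw [if_neg (by rw [h2, Bool.eq_false_iff.mpr h3]; simp)]
        refine List.countP_eq_zero.mpr (fun i _ => ?_)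
        rw [h2, Bool.eq_false_iff.mpr h3]
        simp
    · rw [if_neg (by rw [Bool.eq_false_iff.mpr h2]; simp)]
      refine List.countP_eq_zero.mpr (fun i _ => ?_)
      rw [Bool.eq_false_iff.mpr h2]
      simp
  have hB : (((pvJB ts tw w).filter (fun j => pvWord ts j == k)).map (pvCnt ts tw w)).sum
      = ((List.range ts.length).map
          (fun j => if (pvWord ts j == k) && pvP ts tw j then pvCnt ts tw w j else 0)).sum := by
    show ((((List.range ts.length).filter _).filter (fun j => pvWord ts j == k)).map (pvCnt ts tw w)).sum = _
    rw [List.filter_filter, pv_sum_filter_ite]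
    refine congrArg List.sum (List.map_congr_left (fun j _ => ?_))
    by_cases h2 : (pvWord ts j == k) = true
    · by_cases h3 : pvP ts tw j = true
      · by_cases h4 : (pvM ts tw).any (fun i => pvWin ts w i j) = true
        · rw [if_pos (by rw [h2, h3, h4]; rfl), if_pos (by rw [h2, h3]; rfl)]
        · rw [if_neg (by rw [h2, h3, Bool.eq_false_iff.mpr h4]; simp),
            if_pos (by rw [h2, h3]; rfl), hcnt0 j (Bool.eq_false_iff.mpr h4)]
      · rw [if_neg (by rw [h2, Bool.eq_false_iff.mpr h3]; simp),
          if_neg (by rw [h2, Bool.eq_false_iff.mpr h3]; simp)]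
    · rw [if_neg (by rw [Bool.eq_false_iff.mpr h2]; simp),
        if_neg (by rw [Bool.eq_false_iff.mpr h2]; simp)]
  have hcast : (((pvJB ts tw w).filter (fun j => pvWord ts j == k)).map (fun j => (pvCnt ts tw w j : Int))).sum
      = (((((pvJB ts tw w).filter (fun j => pvWord ts j == k)).map (pvCnt ts tw w)).sum : Nat) : Int) := by
    generalize ((pvJB ts tw w).filter (fun j => pvWord ts j == k)) = L
    induction L with
    | nil => simp
    | cons x L ih => simp [ih]
  rw [hcast, hB, hA]

-- ===== VERDICT (by name: the statement is the Claim_ definition above) =====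
theorem find_collocates_in_window_spec : Claim_equal_find_collocates_in_window := by
  intro ts tw w _
  unfold Spec_find_collocates_in_window
  rw [pv_A_norm, pv_B_norm, PySem.Dict.items_counter]
  have hnd : ((pvJB ts tw w).foldl
      (fun d j => d.modify (pvWord ts j) 0 (· + (pvCnt ts tw w j : Int))) PySem.Dict.empty).keys.Nodup :=
    PySem.Dict.nodup_keys_foldl_modify_key _ _ _ _ _ (by rw [PySem.Dict.keys_empty]; exact List.nodup_nil)
  rw [PySem.Dict.items_eq_map_keys _ hnd 0]
  have hkeys : ((pvJB ts tw w).foldl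
      (fun d j => d.modify (pvWord ts j) 0 (· + (pvCnt ts tw w j : Int))) PySem.Dict.empty).keys
      = PySem.Set.ofList ((pvJA ts tw w).map (pvWord ts)) := by
    rw [PySem.Dict.keys_foldl_modify_key (key := pvWord ts) (f := fun _ j => (· + (pvCnt ts tw w j : Int)))]
    rw [PySem.Dict.keys_empty]
    have hupd : PySem.Set.update ([] : PySem.Set String) ((pvJB ts tw w).map (pvWord ts))
        = PySem.Set.ofList ((pvJB ts tw w).map (pvWord ts)) := by
      rw [PySem.Set.ofList_eq_foldl]; rfl
    rw [hupd, pv_map_ofList (pvWord ts) (pvJA ts tw w), pv_dedup_JA]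
  rw [hkeys]
  apply List.map_congr_left
  intro k _
  have hv := pv_getD_foldl_modify_key_add (pvJB ts tw w) (pvWord ts) (fun j => (pvCnt ts tw w j : Int))
      PySem.Dict.empty k
  rw [PySem.Dict.getD_empty, zero_add] at hv
  exact congrArg (Prod.mk k) ((pv_count_eq ts tw w k).trans hv.symm)
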